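-- pv_equiv track=rewrite | github.com/Rampex1/ArtificalIntelligence | a1/p6.py | number_of_attacks
-- ===== SOURCE A (Python) =====
-- def number_of_attacks(problem):
--     #Your p6 code here
--     queens = problem
--     n = 8
--
--     def total_conflicts(modified_queens):
--         count = 0
--         for i in range(len(modified_queens)):
--             r1, c1 = modified_queens[i]
--             for j in range(i+1, len(modified_queens)):
--                 r2, c2 = modified_queens[j]
--                 if r1 == r2 or c1 == c2 or abs(r1 - r2) == abs(c1 - c2):
--                     count += 1
--         return count
--
--     result = []
--     for r in range(n):
--         row_vals = []
--         for c in range(n):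
--             modified = [(qr, qc) for (qr, qc) in queens if qc != c]
--             modified.append((r, c))
--             row_vals.append(f"{total_conflicts(modified):2d}")
--         result.append(" ".join(row_vals))
--
--     solution = "\n".join(result)
--     return solution
-- ===== SOURCE B (Python) =====
-- def number_of_attacks(problem):
--     n = 8
--
--     def conflict(r1, c1, r2, c2):
--         return r1 == r2 or c1 == c2 or abs(r1 - r2) == abs(c1 - c2)
--
--     # grid[c][r] built column-first: the pairwise count among the queens
--     # outside column c is independent of r, so it is computed once per column.
--     columns = []
--     for c in range(n):
--         remaining = [q for q in problem if q[1] != c]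
--         base = 0
--         rest = remaining
--         while rest:
--             (r1, c1), rest = rest[0], rest[1:]
--             base += sum(1 for (r2, c2) in rest if conflict(r1, c1, r2, c2))
--         col = []
--         for r in range(n):
--             attacks = sum(1 for (qr, qc) in remaining
--                           if qr == r or abs(qr - r) == abs(qc - c))
--             col.append(f"{base + attacks:2d}")
--         columns.append(col)
--     return "\n".join(" ".join(columns[c][r] for c in range(n)) for r in range(n))
-- ===== Notes on version B (the rewrite author's own statement) =====
-- stated objective: faster
-- what changed: B loops over columns first, computing the pairwise conflict count among the queens outside column c once per column (instead of once per cell) and obtaining each cell as that base plus a single-pass count of the new queen's row/diagonal attacks, then assembles the rows; A recomputes the full O(m^2) pairwise count for every one of the 64 cells.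
import Mathlib
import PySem

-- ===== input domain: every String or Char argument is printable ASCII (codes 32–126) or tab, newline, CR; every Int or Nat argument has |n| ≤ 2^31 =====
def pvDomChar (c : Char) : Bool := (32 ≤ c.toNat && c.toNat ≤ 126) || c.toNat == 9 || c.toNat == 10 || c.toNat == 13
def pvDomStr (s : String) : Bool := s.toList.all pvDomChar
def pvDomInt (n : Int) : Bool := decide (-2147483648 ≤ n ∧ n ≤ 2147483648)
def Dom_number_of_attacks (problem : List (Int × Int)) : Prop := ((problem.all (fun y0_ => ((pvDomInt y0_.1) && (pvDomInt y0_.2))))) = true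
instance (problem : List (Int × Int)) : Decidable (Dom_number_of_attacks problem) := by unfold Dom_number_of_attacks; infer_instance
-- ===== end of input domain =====

-- B hoists the r-independent pairwise conflict count out of the row loop (computed once per
-- column instead of once per cell) and counts the new queen's attacks in a single pass.

-- ===== PORT A =====
-- f"{v:2d}": right-align in width 2, padding with a space (shared formatting helper)
def pvFmt (v : Int) : String :=
  if (PySem.Int.toChars v).length < 2 then " " ++ PySem.Int.toStr v else PySem.Int.toStr v

-- A's total_conflicts: nested index loops over all pairs i < j
def pvTotalConflicts (mq : List (Int × Int)) : Int :=
  (PySem.List.pyRange 0 (mq.length : Int) 1).foldl (fun count i =>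
    let p1 := PySem.List.pyGetD mq i (0, 0)
    (PySem.List.pyRange (i + 1) (mq.length : Int) 1).foldl (fun count j =>
      let p2 := PySem.List.pyGetD mq j (0, 0)
      if p1.1 == p2.1 || p1.2 == p2.2 || ((p1.1 - p2.1).natAbs == (p1.2 - p2.2).natAbs)
      then count + 1 else count) count) 0

def number_of_attacks (problem : List (Int × Int)) : String :=
  let queens := problem
  let result := (PySem.List.pyRange 0 8 1).foldl (fun result r =>
    let row_vals := (PySem.List.pyRange 0 8 1).foldl (fun row_vals c =>
      let modified := (queens.filter (fun q => q.2 != c)) ++ [(r, c)]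
      row_vals ++ [pvFmt (pvTotalConflicts modified)]) []
    result ++ [PySem.Str.join " " row_vals]) []
  PySem.Str.join "\n" result

-- ===== PORT B =====
def pvConflict (r1 c1 r2 c2 : Int) : Bool :=
  r1 == r2 || c1 == c2 || ((r1 - r2).natAbs == (c1 - c2).natAbs)

-- B's while-loop over the remaining list: head against the rest, then recurse on the rest
def pvBase : List (Int × Int) → Int
  | [] => 0
  | (r1, c1) :: rest => (rest.countP (fun q => pvConflict r1 c1 q.1 q.2) : Int) + pvBase rest

def number_of_attacks_alt (problem : List (Int × Int)) : String :=
  let columns := (PySem.List.pyRange 0 8 1).foldl (fun columns c =>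
    let remaining := problem.filter (fun q => q.2 != c)
    let base := pvBase remaining
    let col := (PySem.List.pyRange 0 8 1).foldl (fun col r =>
      col ++ [pvFmt (base + (remaining.countP (fun q =>
        q.1 == r || ((q.1 - r).natAbs == (q.2 - c).natAbs)) : Int))]) []
    columns ++ [col]) []
  PySem.Str.join "\n" ((PySem.List.pyRange 0 8 1).map (fun r =>
    PySem.Str.join " " ((PySem.List.pyRange 0 8 1).map (fun c =>
      PySem.List.pyGetD (PySem.List.pyGetD columns c []) r ""))))

-- ===== PRECONDITION & SPEC =====
def Spec_number_of_attacks (problem : List (Int × Int)) (out : String) : Prop := out = number_of_attacks_alt problem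
instance (problem : List (Int × Int)) (out : String) : Decidable (Spec_number_of_attacks problem out) := by unfold Spec_number_of_attacks; infer_instance

-- ===== CLAIM (what is proved, stated in full; the proofs are below) =====
def Claim_equal_number_of_attacks : Prop := ∀ (problem : List (Int × Int)), Dom_number_of_attacks problem → Spec_number_of_attacks problem (number_of_attacks problem)

-- ===== LEMMAS AND PROOFS =====

-- structural form of A's pairwise count: each element against the later ones
def pvPairs : List (Int × Int) → Int
  | [] => 0
  | p :: t => (t.countP (fun q => pvConflict p.1 p.2 q.1 q.2) : Int) + pvPairs t

-- A's inner index loop from a is the count of conflicts with the elements after position a-1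
theorem pvInner_eq (mq : List (Int × Int)) (p1 : Int × Int) (a : Int) (ha : 0 ≤ a) (acc : Int) :
    (PySem.List.pyRange a (mq.length : Int) 1).foldl (fun count j =>
      let p2 := PySem.List.pyGetD mq j (0, 0)
      if p1.1 == p2.1 || p1.2 == p2.2 || ((p1.1 - p2.1).natAbs == (p1.2 - p2.2).natAbs)
      then count + 1 else count) acc
    = acc + ((mq.drop a.toNat).countP (fun q => pvConflict p1.1 p1.2 q.1 q.2) : Int) := by
  rw [PySem.List.foldl_pyRange_pyGetD' mq (0, 0)
      (fun count p2 => if p1.1 == p2.1 || p1.2 == p2.2 || ((p1.1 - p2.1).natAbs == (p1.2 - p2.2).natAbs)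
        then count + 1 else count) acc ha]
  rw [PySem.List.foldl_if_add_one]
  simp [pvConflict]

theorem pvTC_eq_sum (mq : List (Int × Int)) :
    pvTotalConflicts mq = ((PySem.List.pyRange 0 (mq.length : Int) 1).map (fun i =>
      ((mq.drop (i + 1).toNat).countP (fun q =>
        pvConflict (PySem.List.pyGetD mq i (0, 0)).1 (PySem.List.pyGetD mq i (0, 0)).2 q.1 q.2) : Int))).sum := by
  unfold pvTotalConflicts
  rw [PySem.List.foldl_congr_mem _ _
      (fun count i => count + ((mq.drop (i + 1).toNat).countP (fun q =>
        pvConflict (PySem.List.pyGetD mq i (0, 0)).1 (PySem.List.pyGetD mq i (0, 0)).2 q.1 q.2) : Int)) _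
      (by
        intro acc i hi
        have h0 : (0:Int) ≤ i := (PySem.List.mem_pyRange_one.mp hi).1
        exact pvInner_eq mq _ (i + 1) (by omega) acc)]
  rw [PySem.List.foldl_add]
  simp

theorem pvTC_cons (x : Int × Int) (xs : List (Int × Int)) :
    pvTotalConflicts (x :: xs) =
      (xs.countP (fun q => pvConflict x.1 x.2 q.1 q.2) : Int) + pvTotalConflicts xs := by
  rw [pvTC_eq_sum, pvTC_eq_sum]
  have hlen : ((x :: xs).length : Int) = (xs.length : Int) + 1 := by simp
  rw [hlen, PySem.List.pyRange_one_cons (by positivity)]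
  rw [List.map_cons, List.sum_cons]
  congr 1
  · simp [PySem.List.pyGetD_ofNat']
  · rw [PySem.List.pyRange_one, PySem.List.pyRange_one]
    simp only [List.map_map]
    rw [show ((xs.length : Int) + 1 - (0 + 1)).toNat = ((xs.length : Int) - 0).toNat from by omega]
    apply congrArg
    apply List.map_congr_left
    intro k hk
    simp only [Function.comp]
    have h1 : (0 + 1 + (k:Int)) = ((k + 1 : Nat) : Int) := by omega
    have h2 : (0 + (k:Int)) = ((k : Nat) : Int) := by omega
    rw [h1, h2, PySem.List.pyGetD_natCast, PySem.List.pyGetD_natCast]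
    have h3 : (((k + 1 : Nat) : Int) + 1).toNat = k + 2 := by omega
    have h4 : (((k : Nat) : Int) + 1).toNat = k + 1 := by omega
    rw [h3, h4]
    simp

theorem pvTotalConflicts_eq_pvPairs (mq : List (Int × Int)) :
    pvTotalConflicts mq = pvPairs mq := by
  induction mq with
  | nil => rfl
  | cons p t ih => rw [pvTC_cons, pvPairs, ih]

-- appending the new queen (r, c) to a list with no queen in column c adds exactly
-- its row/diagonal attacks to the pairwise count
theorem pvPairs_append_singleton (rem : List (Int × Int)) (r c : Int)
    (h : ∀ q ∈ rem, q.2 ≠ c) :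
    pvPairs (rem ++ [(r, c)]) =
      pvPairs rem + (rem.countP (fun q =>
        q.1 == r || ((q.1 - r).natAbs == (q.2 - c).natAbs)) : Int) := by
  induction rem with
  | nil => simp [pvPairs]
  | cons p t ih =>
    have hp : p.2 ≠ c := h p (by simp)
    have ht : ∀ q ∈ t, q.2 ≠ c := fun q hq => h q (by simp [hq])
    rw [List.cons_append, pvPairs, pvPairs, ih ht, List.countP_append, List.countP_cons]
    have hp' : (p.2 == c) = false := by simpa using hp
    have hc : pvConflict p.1 p.2 r c = (p.1 == r || ((p.1 - r).natAbs == (p.2 - c).natAbs)) := by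
      simp [pvConflict, hp']
    simp only [hc]
    by_cases hb : (p.1 == r || ((p.1 - r).natAbs == (p.2 - c).natAbs)) = true <;>
      simp [hb] <;> ring

theorem pvPairs_eq_pvBase (l : List (Int × Int)) : pvPairs l = pvBase l := by
  induction l with
  | nil => rfl
  | cons p t ih => cases p; simp [pvPairs, pvBase, ih]

-- A's cell value equals B's base + attacks decomposition
theorem pvCell_eq (problem : List (Int × Int)) (r c : Int) :
    pvTotalConflicts ((problem.filter (fun q => q.2 != c)) ++ [(r, c)]) =
      pvBase (problem.filter (fun q => q.2 != c)) +
      ((problem.filter (fun q => q.2 != c)).countP (fun q =>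
        q.1 == r || ((q.1 - r).natAbs == (q.2 - c).natAbs)) : Int) := by
  rw [pvTotalConflicts_eq_pvPairs, pvPairs_append_singleton, pvPairs_eq_pvBase]
  intro q hq
  have := List.of_mem_filter hq
  simpa using this

-- ===== VERDICT (by name: the statement is the Claim_ definition above) =====
theorem number_of_attacks_spec : Claim_equal_number_of_attacks := by
  intro problem _
  show number_of_attacks problem = number_of_attacks_alt problem
  have h8 : PySem.List.pyRange 0 8 1 = [0, 1, 2, 3, 4, 5, 6, 7] := by decide
  simp only [number_of_attacks, number_of_attacks_alt, h8, List.foldl, List.map,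
    PySem.List.pyGetD_ofNat', List.getD, pvCell_eq,
    List.nil_append, List.cons_append]
  rfl
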